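-- pv_equiv track=rewrite | github.com/gregordick/divinum-officium-alterum | scripts/bringup/bringup-datagen.py | expand_calendar_at_refs
-- ===== SOURCE A (Python) =====
-- def expand_calendar_at_refs(raw_do_calendar):
--     def expand(lines):
--         for line in lines:
--             if line.startswith('@:'):
--                 yield from expand(raw_do_calendar[line[2:]])
--             else:
--                 yield line
--     return {k: list(expand(v)) for (k, v) in raw_do_calendar.items()}
-- ===== SOURCE B (Python) =====
-- def expand_calendar_at_refs(raw_do_calendar):
--     result = {}
--     for k, v in raw_do_calendar.items():
--         lines = list(v)
--         while any(line.startswith('@:') for line in lines):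
--             new_lines = []
--             for line in lines:
--                 if line.startswith('@:'):
--                     new_lines.extend(raw_do_calendar[line[2:]])
--                 else:
--                     new_lines.append(line)
--             lines = new_lines
--         result[k] = lines
--     return result
-- ===== Notes on version B (the rewrite author's own statement) =====
-- stated objective: alternative
-- what changed: Replaces A's recursive depth-first generator by an iterative fixed point: each value's line list is rewritten in full passes (every '@:' line replaced by its target's lines) until no reference lines remain.
import Mathlib
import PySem

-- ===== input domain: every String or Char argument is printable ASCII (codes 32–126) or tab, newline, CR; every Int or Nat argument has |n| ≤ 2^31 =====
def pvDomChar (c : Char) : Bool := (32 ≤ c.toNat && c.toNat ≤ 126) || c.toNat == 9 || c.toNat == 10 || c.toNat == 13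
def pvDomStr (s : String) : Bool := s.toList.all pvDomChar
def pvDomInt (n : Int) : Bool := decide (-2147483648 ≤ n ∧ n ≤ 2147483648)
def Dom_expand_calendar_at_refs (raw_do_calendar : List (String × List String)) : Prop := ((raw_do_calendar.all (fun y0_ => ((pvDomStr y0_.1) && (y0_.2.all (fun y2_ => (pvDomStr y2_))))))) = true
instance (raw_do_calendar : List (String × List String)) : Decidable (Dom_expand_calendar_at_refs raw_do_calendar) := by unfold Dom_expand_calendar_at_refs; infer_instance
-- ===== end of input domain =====

-- B replaces A's recursive depth-first generator by an iterative fixed-point rewriting of each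
-- value (objective: alternative, not faster).  Equivalence is about the returned dict on inputs
-- where A returns (no dangling '@:' reference, no reference cycle); see Pre_ below.

-- shared helpers (used by both ports and by Pre_): the '@:' test, the reference target,
-- the dict view of the input, and dict lookup (get? = none is Python's KeyError, excluded by Pre_)
def pvIsRef (l : String) : Bool := PySem.Str.startswith l "@:"
def pvTgt (l : String) : String := PySem.Str.slice l (some 2) none
def pvCal (raw : List (String × List String)) : PySem.Dict String (List String) := PySem.Dict.ofList raw
def pvLook (raw : List (String × List String)) (k : String) : List String := ((pvCal raw).get? k).getD []
def pvRefs (ls : List String) : List String := ls.filterMap (fun l => if pvIsRef l then some (pvTgt l) else none)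

-- ===== PORT A =====
-- A's recursive generator 'expand', with a fuel guard (recursion depth) that only makes the
-- recursion total; under Pre_ the depth never exceeds the number of keys, so fuel never runs out.
def pvExpandA (raw : List (String × List String)) : Nat → List String → List String
  | _, [] => []
  | 0, _ :: _ => []          -- fuel exhausted: unreachable under Pre_
  | fuel + 1, l :: rest =>
      (if pvIsRef l then pvExpandA raw fuel (pvLook raw (pvTgt l)) else [l])
        ++ pvExpandA raw (fuel + 1) rest
  termination_by fuel ls => (fuel, ls.length)

def expand_calendar_at_refs (raw_do_calendar : List (String × List String)) : List (String × List String) :=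
  (pvCal raw_do_calendar).items.map
    (fun kv => (kv.1, pvExpandA raw_do_calendar ((pvCal raw_do_calendar).keys.length + 1) kv.2))

-- ===== PORT B =====
-- one full rewriting pass: every '@:' line is replaced by its target's lines
def pvSubst (raw : List (String × List String)) (lines : List String) : List String :=
  lines.flatMap (fun l => if pvIsRef l then pvLook raw (pvTgt l) else [l])

-- B's while-loop, with a fuel guard (number of passes) that only makes the loop total;
-- under Pre_ all references die out within (number of keys) passes.
def pvLoopB (raw : List (String × List String)) : Nat → List String → List String
  | 0, lines => lines        -- fuel exhausted: unreachable under Pre_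
  | fuel + 1, lines => if lines.any pvIsRef then pvLoopB raw fuel (pvSubst raw lines) else lines

def expand_calendar_at_refs_alt (raw_do_calendar : List (String × List String)) : List (String × List String) :=
  (pvCal raw_do_calendar).items.map
    (fun kv => (kv.1, pvLoopB raw_do_calendar ((pvCal raw_do_calendar).keys.length + 1) kv.2))

-- ===== PRECONDITION & SPEC =====
-- one accumulation step of the set of keys reachable through '@:' references
def pvStepR (raw : List (String × List String)) (S : List String) : List String :=
  PySem.List.dedup (S ++ S.flatMap (fun t => pvRefs (pvLook raw t)))

-- all keys reachable (in ≥ 1 step) from the references of k's value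
def pvReach (raw : List (String × List String)) (k : String) : List String :=
  (pvStepR raw)^[(pvCal raw).keys.length] (PySem.List.dedup (pvRefs (pvLook raw k)))

-- Pre_ excludes exactly the inputs on which A does not return: a dangling '@:' reference in some
-- value (KeyError) or a reference cycle (unbounded recursion); everywhere else A returns normally.
def Pre_expand_calendar_at_refs (raw_do_calendar : List (String × List String)) : Prop :=
  (∀ v ∈ (pvCal raw_do_calendar).values, ∀ t ∈ pvRefs v, (pvCal raw_do_calendar).contains t = true)
  ∧ (∀ k ∈ (pvCal raw_do_calendar).keys, k ∉ pvReach raw_do_calendar k)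

instance (raw_do_calendar : List (String × List String)) : Decidable (Pre_expand_calendar_at_refs raw_do_calendar) := by
  unfold Pre_expand_calendar_at_refs; infer_instance

def pvWitness_expand_calendar_at_refs : (List (String × List String)) :=
  [("feast", ["@:common", "v2"]), ("common", ["c1", "c2"])]

def Spec_expand_calendar_at_refs (raw_do_calendar : List (String × List String)) (out : List (String × List String)) : Prop := out = expand_calendar_at_refs_alt raw_do_calendar
instance (raw_do_calendar : List (String × List String)) (out : List (String × List String)) : Decidable (Spec_expand_calendar_at_refs raw_do_calendar out) := by unfold Spec_expand_calendar_at_refs; infer_instance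

-- ===== CLAIM (what is proved, stated in full; the proofs are below) =====
def Claim_equal_expand_calendar_at_refs : Prop := ∀ (raw_do_calendar : List (String × List String)), Dom_expand_calendar_at_refs raw_do_calendar → Pre_expand_calendar_at_refs raw_do_calendar → Spec_expand_calendar_at_refs raw_do_calendar (expand_calendar_at_refs raw_do_calendar)

-- ===== LEMMAS AND PROOFS =====

-- the one-step reference successor map: targets of the references of the looked-up values
def pvF (raw : List (String × List String)) (ts : List String) : List String :=
  ts.flatMap (fun t => pvRefs (pvLook raw t))

-- the reference edge relation
def pvEdge (raw : List (String × List String)) (a b : String) : Prop :=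
  b ∈ pvRefs (pvLook raw a)

theorem pvRefs_subst (raw : List (String × List String)) (lines : List String) :
    pvRefs (pvSubst raw lines) = pvF raw (pvRefs lines) := by
  induction lines with
  | nil => simp [pvRefs, pvSubst, pvF]
  | cons l ls ih =>
      by_cases h : pvIsRef l = true
      · simp [pvSubst, pvRefs, pvF, h, List.flatMap_cons] at *
        simp [ih]
      · simp [pvSubst, pvRefs, pvF, h, List.flatMap_cons] at *
        simp [ih]

theorem pvF_singleton (raw : List (String × List String)) (a : String) :
    pvF raw [a] = pvRefs (pvLook raw a) := by simp [pvF]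

theorem pvF_subset (raw : List (String × List String)) {ts us : List String} (h : ts ⊆ us) :
    pvF raw ts ⊆ pvF raw us := by
  intro x hx
  simp [pvF, List.mem_flatMap] at hx ⊢
  obtain ⟨t, ht, hx⟩ := hx
  exact ⟨t, h ht, hx⟩

theorem pvF_iterate_subset (raw : List (String × List String)) (i : Nat) {ts us : List String}
    (h : ts ⊆ us) : (pvF raw)^[i] ts ⊆ (pvF raw)^[i] us := by
  induction i generalizing ts us with
  | zero => exact h
  | succ n ih => rw [Function.iterate_succ_apply, Function.iterate_succ_apply]
                 exact ih (pvF_subset raw h)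

theorem pvExpandA_nil (raw : List (String × List String)) (f : Nat) :
    pvExpandA raw f [] = [] := by cases f <;> simp [pvExpandA]

theorem pvExpandA_zero (raw : List (String × List String)) (b : List String) :
    pvExpandA raw 0 b = [] := by cases b <;> simp [pvExpandA]

theorem pvExpandA_cons (raw : List (String × List String)) (f : Nat) (l : String) (ls : List String) :
    pvExpandA raw (f + 1) (l :: ls) =
      (if pvIsRef l then pvExpandA raw f (pvLook raw (pvTgt l)) else [l]) ++ pvExpandA raw (f + 1) ls := by
  rw [pvExpandA]

theorem pvSubst_cons (raw : List (String × List String)) (l : String) (ls : List String) :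
    pvSubst raw (l :: ls) = (if pvIsRef l then pvLook raw (pvTgt l) else [l]) ++ pvSubst raw ls := by
  simp [pvSubst]

theorem pvExpandA_append (raw : List (String × List String)) (f : Nat) (a b : List String) :
    pvExpandA raw f (a ++ b) = pvExpandA raw f a ++ pvExpandA raw f b := by
  induction a with
  | nil => simp [pvExpandA_nil]
  | cons l ls ih =>
      cases f with
      | zero => simp [pvExpandA_zero]
      | succ g => rw [List.cons_append, pvExpandA_cons, pvExpandA_cons, ih, List.append_assoc]

theorem pvExpandA_noref (raw : List (String × List String)) (f : Nat) (lines : List String)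
    (h : pvRefs lines = []) : pvExpandA raw (f + 1) lines = lines := by
  induction lines with
  | nil => rw [pvExpandA_nil]
  | cons l ls ih =>
      have hl : pvIsRef l = false := by
        by_contra hc
        simp [pvRefs, eq_true_of_ne_false (by simpa using hc)] at h
      have hls : pvRefs ls = [] := by
        simpa [pvRefs, hl] using h
      rw [pvExpandA_cons, if_neg (by simp [hl]), ih hls]
      rfl

theorem pvSubst_noref (raw : List (String × List String)) (lines : List String)
    (h : pvRefs lines = []) : pvSubst raw lines = lines := by
  induction lines with
  | nil => rfl
  | cons l ls ih =>
      have hl : pvIsRef l = false := by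
        by_contra hc
        simp [pvRefs, eq_true_of_ne_false (by simpa using hc)] at h
      have hls : pvRefs ls = [] := by
        simpa [pvRefs, hl] using h
      rw [pvSubst_cons, if_neg (by simp [hl]), ih hls]
      rfl

theorem pvSubst_iterate_noref (raw : List (String × List String)) (m : Nat) (lines : List String)
    (h : pvRefs lines = []) : (pvSubst raw)^[m] lines = lines := by
  induction m with
  | zero => rfl
  | succ n ih => rw [Function.iterate_succ_apply, pvSubst_noref raw lines h, ih]

theorem pvAny_eq_false_iff (lines : List String) :
    lines.any pvIsRef = false ↔ pvRefs lines = [] := by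
  constructor
  · intro h
    simp [List.any_eq_false] at h
    simp [pvRefs, List.filterMap_eq_nil_iff]
    intro l hl
    simp [h l hl]
  · intro h
    simp [pvRefs, List.filterMap_eq_nil_iff] at h
    simp [List.any_eq_false]
    intro l hl
    have := h l hl
    by_contra hc
    simp [eq_true_of_ne_false (by simpa using hc)] at this

theorem pvRefs_subst_iterate (raw : List (String × List String)) (i : Nat) (lines : List String) :
    pvRefs ((pvSubst raw)^[i] lines) = (pvF raw)^[i] (pvRefs lines) := by
  induction i generalizing lines with
  | zero => rfl
  | succ n ih =>
      rw [Function.iterate_succ_apply, Function.iterate_succ_apply, ih, pvRefs_subst]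

theorem pvL1 (raw : List (String × List String)) (f : Nat) (lines : List String) :
    pvExpandA raw (f + 2) lines = pvExpandA raw (f + 1) (pvSubst raw lines) := by
  induction lines with
  | nil => simp [pvExpandA_nil, pvSubst]
  | cons l ls ih =>
      by_cases hl : pvIsRef l = true
      · simp only [pvExpandA_cons, pvSubst_cons, if_pos hl, pvExpandA_append, ih]
      · simp only [pvExpandA_cons, pvSubst_cons, if_neg hl, pvExpandA_append, ih,
          pvExpandA_nil, List.append_nil]

theorem pvL1_iterate (raw : List (String × List String)) (d : Nat) (lines : List String) :
    pvExpandA raw (d + 1) lines = pvExpandA raw 1 ((pvSubst raw)^[d] lines) := by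
  induction d generalizing lines with
  | zero => rfl
  | succ n ih =>
      have : n + 1 + 1 = n + 2 := rfl
      rw [this, pvL1 raw n lines, ih (pvSubst raw lines), Function.iterate_succ_apply]

theorem pvLoopB_eq (raw : List (String × List String)) (f : Nat) (lines : List String)
    (h : pvRefs ((pvSubst raw)^[f] lines) = []) : pvLoopB raw f lines = (pvSubst raw)^[f] lines := by
  induction f generalizing lines with
  | zero => rfl
  | succ n ih =>
      by_cases ha : lines.any pvIsRef = true
      · rw [pvLoopB, if_pos ha, Function.iterate_succ_apply,
            ih (pvSubst raw lines) (by rw [← Function.iterate_succ_apply]; exact h)]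
      · have hr : pvRefs lines = [] := (pvAny_eq_false_iff lines).1 (by simpa using ha)
        rw [pvLoopB, if_neg ha, pvSubst_iterate_noref raw (n + 1) lines hr]

theorem pvExseq (raw : List (String × List String)) (i : Nat) (ts : List String) (x : String)
    (hx : x ∈ (pvF raw)^[i + 1] ts) :
    ∃ t ∈ ts, ∃ c : List String, c.length = i ∧ List.IsChain (pvEdge raw) (t :: (c ++ [x])) := by
  induction i generalizing ts with
  | zero =>
      rw [Function.iterate_one] at hx
      obtain ⟨t, ht, hxt⟩ := List.mem_flatMap.1 hx
      exact ⟨t, ht, [], rfl, List.isChain_cons_cons.2 ⟨hxt, List.isChain_singleton x⟩⟩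
  | succ n ih =>
      rw [Function.iterate_succ_apply] at hx
      obtain ⟨u, hu, c, hclen, hchain⟩ := ih (pvF raw ts) hx
      obtain ⟨t, ht, hut⟩ := List.mem_flatMap.1 hu
      refine ⟨t, ht, u :: c, by simp [hclen], ?_⟩
      exact List.isChain_cons_cons.2 ⟨hut, hchain⟩

theorem pvChainF (raw : List (String × List String)) (l : List String) (a b : String)
    (h : List.IsChain (pvEdge raw) (a :: (l ++ [b]))) : b ∈ (pvF raw)^[l.length + 1] [a] := by
  induction l generalizing a with
  | nil =>
      have := (List.isChain_cons_cons.1 h).1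
      rw [show ([] : List String).length + 1 = 1 from rfl, Function.iterate_one, pvF_singleton]
      exact this
  | cons u l' ih =>
      have h2 := List.isChain_cons_cons.1 h
      have hb := ih u h2.2
      have hsub : ([u] : List String) ⊆ pvF raw [a] := by
        intro y hy
        simp at hy
        subst hy
        rw [pvF_singleton]
        exact h2.1
      have : b ∈ (pvF raw)^[l'.length + 1] (pvF raw [a]) :=
        pvF_iterate_subset raw (l'.length + 1) hsub hb
      rw [← Function.iterate_succ_apply] at this
      simpa using this

theorem pvChain_mem_keys (raw : List (String × List String))
    (hP : ∀ s, pvRefs (pvLook raw s) ⊆ (pvCal raw).keys) :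
    ∀ (c : List String), List.IsChain (pvEdge raw) c → (∀ y ∈ c.head?, y ∈ (pvCal raw).keys) →
      ∀ x ∈ c, x ∈ (pvCal raw).keys := by
  intro c
  induction c with
  | nil => intro _ _ x hx; simp at hx
  | cons y c' ih =>
      intro hc hh x hx
      have hy : y ∈ (pvCal raw).keys := hh y (by simp)
      rcases List.mem_cons.1 hx with rfl | hx'
      · exact hy
      · cases c' with
        | nil => simp at hx'
        | cons z c'' =>
            have h2 := List.isChain_cons_cons.1 hc
            have hz : z ∈ (pvCal raw).keys := hP y h2.1
            exact ih h2.2 (by simp [hz]) x hx' 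

theorem pvDupSplit {α : Type} (l : List α) (h : ¬ l.Nodup) :
    ∃ a l1 l2 l3, l = l1 ++ a :: (l2 ++ a :: l3) := by
  induction l with
  | nil => simp at h
  | cons x xs ih =>
      by_cases hx : x ∈ xs
      · obtain ⟨s, t, hst⟩ := List.append_of_mem hx
        exact ⟨x, [], s, t, by simp [hst]⟩
      · have : ¬ xs.Nodup := by
          intro hn; exact h (List.nodup_cons.2 ⟨hx, hn⟩)
        obtain ⟨a, l1, l2, l3, rfl⟩ := ih this
        exact ⟨a, x :: l1, l2, l3, rfl⟩

theorem pvMemR (raw : List (String × List String)) (i : Nat) (ts : List String) :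
    ∀ x, x ∈ (pvStepR raw)^[i] (PySem.List.dedup ts) ↔ ∃ j ≤ i, x ∈ (pvF raw)^[j] ts := by
  induction i with
  | zero =>
      intro x
      simp
  | succ n ih =>
      intro x
      rw [Function.iterate_succ_apply']
      constructor
      · intro hx
        have hx' : x ∈ (pvStepR raw)^[n] (PySem.List.dedup ts) ∨
            ∃ t ∈ (pvStepR raw)^[n] (PySem.List.dedup ts), x ∈ pvRefs (pvLook raw t) := by
          simpa [pvStepR, PySem.List.mem_dedup, List.mem_append, List.mem_flatMap] using hx
        rcases hx' with hx' | ⟨t, ht, hxt⟩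
        · obtain ⟨j, hj, hm⟩ := (ih x).1 hx'
          exact ⟨j, by omega, hm⟩
        · obtain ⟨j, hj, hm⟩ := (ih t).1 ht
          refine ⟨j + 1, by omega, ?_⟩
          rw [Function.iterate_succ_apply']
          exact List.mem_flatMap.2 ⟨t, hm, hxt⟩
      · rintro ⟨j, hj, hm⟩
        simp only [pvStepR, PySem.List.mem_dedup, List.mem_append, List.mem_flatMap]
        rcases Nat.lt_or_ge j (n + 1) with hlt | hge
        · exact Or.inl ((ih x).2 ⟨j, by omega, hm⟩)
        · have hjn : j = n + 1 := by omega
          subst hjn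
          rw [Function.iterate_succ_apply'] at hm
          obtain ⟨t, ht, hxt⟩ := List.mem_flatMap.1 hm
          exact Or.inr ⟨t, (ih t).2 ⟨n, le_refl n, ht⟩, hxt⟩

theorem pvPresence (raw : List (String × List String))
    (h : ∀ v ∈ (pvCal raw).values, ∀ t ∈ pvRefs v, (pvCal raw).contains t = true) :
    ∀ s, pvRefs (pvLook raw s) ⊆ (pvCal raw).keys := by
  intro s x hx
  unfold pvLook at hx
  cases hg : ((pvCal raw).get? s) with
  | none => rw [hg] at hx; simp [pvRefs] at hx
  | some v =>
      rw [hg] at hx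
      have hv : v ∈ (pvCal raw).values := by
        have := PySem.Dict.mem_items_of_get?_eq_some (pvCal raw) hg
        exact List.mem_map.2 ⟨(s, v), this, rfl⟩
      exact ((pvCal raw).contains_iff_mem_keys x).1 (h v hv x hx)

theorem pvNoChain (raw : List (String × List String)) (hPre : Pre_expand_calendar_at_refs raw)
    (v : List String) (hv : v ∈ (pvCal raw).values) :
    (pvF raw)^[(pvCal raw).keys.length] (pvRefs v) = [] := by
  by_contra hne
  obtain ⟨x, hx⟩ := List.exists_mem_of_ne_nil _ hne
  have hP := pvPresence raw hPre.1
  have hrv : pvRefs v ⊆ (pvCal raw).keys := by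
    intro t ht
    exact ((pvCal raw).contains_iff_mem_keys t).1 (hPre.1 v hv t ht)
  cases hK0 : (pvCal raw).keys.length with
  | zero =>
      have hkeys : (pvCal raw).keys = [] := List.length_eq_zero_iff.1 hK0
      have : pvRefs v = [] := List.eq_nil_iff_forall_not_mem.2 (fun t ht => by
        have := hrv ht; rw [hkeys] at this; simp at this)
      rw [hK0] at hx
      simp [this] at hx
  | succ i =>
      rw [hK0] at hx
      obtain ⟨t, ht, c, hclen, hchain⟩ := pvExseq raw i (pvRefs v) x hx
      have hmemkeys : ∀ y ∈ (t :: (c ++ [x])), y ∈ (pvCal raw).keys :=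
        pvChain_mem_keys raw hP _ hchain (by simp; exact hrv ht)
      have hlen : (t :: (c ++ [x])).length = i + 2 := by simp [hclen]
      have hnotnodup : ¬ (t :: (c ++ [x])).Nodup := by
        intro hnd
        have hle := (hnd.subperm (fun y hy => hmemkeys y hy)).length_le
        rw [hlen, hK0] at hle
        omega
      obtain ⟨a, l1, l2, l3, hdec⟩ := pvDupSplit _ hnotnodup
      have hak : a ∈ (pvCal raw).keys := hmemkeys a (by rw [hdec]; simp)
      have hchain2 : List.IsChain (pvEdge raw) (a :: (l2 ++ [a])) := by
        have hre : (t :: (c ++ [x])) = l1 ++ ((a :: (l2 ++ [a])) ++ l3) := by simp [hdec]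
        rw [hre] at hchain
        exact (List.isChain_append.1 (List.isChain_append.1 hchain).2.1).1
      have hmem : a ∈ (pvF raw)^[l2.length + 1] [a] := pvChainF raw l2 a a hchain2
      rw [Function.iterate_succ_apply, pvF_singleton] at hmem
      have hlens := congrArg List.length hdec
      simp at hlens
      have hl2 : l2.length ≤ (pvCal raw).keys.length := by rw [hK0]; omega
      have : a ∈ pvReach raw a :=
        (pvMemR raw (pvCal raw).keys.length (pvRefs (pvLook raw a)) a).2 ⟨l2.length, hl2, hmem⟩
      exact hPre.2 a hak this

theorem pvPerValue (raw : List (String × List String)) (hPre : Pre_expand_calendar_at_refs raw)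
    (v : List String) (hv : v ∈ (pvCal raw).values) :
    pvExpandA raw ((pvCal raw).keys.length + 1) v = pvLoopB raw ((pvCal raw).keys.length + 1) v := by
  have hK := pvNoChain raw hPre v hv
  have h1 : pvRefs ((pvSubst raw)^[(pvCal raw).keys.length] v) = [] := by
    rw [pvRefs_subst_iterate]; exact hK
  have h2 : (pvSubst raw)^[(pvCal raw).keys.length + 1] v = (pvSubst raw)^[(pvCal raw).keys.length] v := by
    rw [Function.iterate_succ_apply', pvSubst_noref raw _ h1]
  rw [pvL1_iterate, pvLoopB_eq raw _ v (by rw [h2]; exact h1), h2]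
  exact pvExpandA_noref raw 0 _ h1

-- ===== VERDICT (by name: the statement is the Claim_ definition above) =====
theorem expand_calendar_at_refs_spec : Claim_equal_expand_calendar_at_refs := by
  intro raw hDom hPre
  unfold Spec_expand_calendar_at_refs expand_calendar_at_refs expand_calendar_at_refs_alt
  apply List.map_congr_left
  intro kv hkv
  have hv : kv.2 ∈ (pvCal raw).values := List.mem_map.2 ⟨kv, hkv, rfl⟩
  rw [pvPerValue raw hPre kv.2 hv]
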